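-- pv_equiv track=rewrite | github.com/Krakoer/projet_bioinfo | algorithms/pattern_matching/treat_results.py | getStartNuc
-- ===== SOURCE A (Python) =====
-- def getStartNuc(chains, chainIndex, subIndex):
--     """
--     Returns the position of the first nuc of a subchain
--     """
--
--     res = 1
--     for i in range(len(chains)):
--         for j in range(len(chains[i])):
--             if i == chainIndex and j == subIndex:
--                 return res-1
--             res += len(chains[i][j])
--
--     return -1
-- ===== SOURCE B (Python) =====
-- def _subOffset(strings, j):
--     """Offset (in nucleotides) of strings[j] within the chain, -1 if j out of range."""
--     if not strings or j < 0:
--         return -1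
--     if j == 0:
--         return 0
--     r = _subOffset(strings[1:], j - 1)
--     return r if r == -1 else r + len(strings[0])
--
--
-- def getStartNuc(chains, chainIndex, subIndex):
--     """
--     Returns the position of the first nuc of a subchain
--     """
--     if chainIndex < 0 or subIndex < 0 or not chains:
--         return -1
--     if chainIndex == 0:
--         return _subOffset(chains[0], subIndex)
--     r = getStartNuc(chains[1:], chainIndex - 1, subIndex)
--     return r if r == -1 else r + sum(len(s) for s in chains[0])
-- ===== Notes on version B (the rewrite author's own statement) =====
-- stated objective: alternative
-- what changed: Replaces the flat double loop with a counter and early return by structural recursion on the list of chains: peel off the head chain, recurse with chainIndex-1, and shift the recursive result by the head chain's total length, propagating the -1 sentinel upward.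
import Mathlib
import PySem

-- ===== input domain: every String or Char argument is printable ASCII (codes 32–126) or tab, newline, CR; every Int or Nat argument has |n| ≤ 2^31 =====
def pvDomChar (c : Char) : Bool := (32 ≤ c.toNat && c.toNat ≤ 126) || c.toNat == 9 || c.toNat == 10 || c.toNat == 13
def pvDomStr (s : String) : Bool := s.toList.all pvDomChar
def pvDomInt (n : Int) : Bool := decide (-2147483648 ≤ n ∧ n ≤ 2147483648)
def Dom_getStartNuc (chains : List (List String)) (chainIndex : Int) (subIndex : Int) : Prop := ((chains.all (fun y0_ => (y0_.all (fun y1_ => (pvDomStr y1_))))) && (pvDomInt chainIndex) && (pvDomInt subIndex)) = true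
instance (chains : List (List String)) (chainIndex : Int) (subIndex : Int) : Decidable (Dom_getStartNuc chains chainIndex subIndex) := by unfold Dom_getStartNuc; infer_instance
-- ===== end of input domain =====

-- B replaces A's flat double loop (counter + early return) by structural recursion on the
-- list of chains, shifting the recursive result by the head chain's length and propagating -1.

-- ===== PORT A =====
-- inner 'for j in range(len(chains[i]))' loop: .inl r = early 'return r', .inr res = loop finished with accumulator res
def getStartNucInnerA (ci si i : Int) : List String → Int → Int → Sum Int Int
  | [], _, res => .inr res
  | s :: rest, j, res =>
      if i = ci ∧ j = si then .inl (res - 1)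
      else getStartNucInnerA ci si i rest (j + 1) (res + PySem.Str.len s)

-- outer 'for i in range(len(chains))' loop
def getStartNucOuterA (ci si : Int) : List (List String) → Int → Int → Int
  | [], _, _ => -1
  | row :: rest, i, res =>
      (getStartNucInnerA ci si i row 0 res).elim
        (fun r => r)
        (fun res' => getStartNucOuterA ci si rest (i + 1) res')

def getStartNuc (chains : List (List String)) (chainIndex : Int) (subIndex : Int) : Int :=
  getStartNucOuterA chainIndex subIndex chains 0 1

-- ===== PORT B =====
-- sum(len(s) for s in l)
def sumLen (l : List String) : Int := (l.map PySem.Str.len).sum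

-- _subOffset: recursion on the list of subchains
def subOffset : List String → Int → Int
  | [], _ => -1
  | s :: rest, j =>
      if j < 0 then -1
      else if j = 0 then 0
      else
        let r := subOffset rest (j - 1)
        if r = -1 then r else r + PySem.Str.len s

def getStartNuc_alt (chains : List (List String)) (chainIndex : Int) (subIndex : Int) : Int :=
  match chains with
  | [] => -1
  | row :: rest =>
      if chainIndex < 0 ∨ subIndex < 0 then -1
      else if chainIndex = 0 then subOffset row subIndex
      else
        let r := getStartNuc_alt rest (chainIndex - 1) subIndex
        if r = -1 then r else r + sumLen row

-- ===== PRECONDITION & SPEC =====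
def Spec_getStartNuc (chains : List (List String)) (chainIndex : Int) (subIndex : Int) (out : Int) : Prop := out = getStartNuc_alt chains chainIndex subIndex
instance (chains : List (List String)) (chainIndex : Int) (subIndex : Int) (out : Int) : Decidable (Spec_getStartNuc chains chainIndex subIndex out) := by unfold Spec_getStartNuc; infer_instance

-- ===== CLAIM (what is proved, stated in full; the proofs are below) =====
def Claim_equal_getStartNuc : Prop := ∀ (chains : List (List String)) (chainIndex : Int) (subIndex : Int), Dom_getStartNuc chains chainIndex subIndex → Spec_getStartNuc chains chainIndex subIndex (getStartNuc chains chainIndex subIndex)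

-- ===== LEMMAS AND PROOFS =====
theorem sumLen_nil : sumLen [] = 0 := rfl

theorem sumLen_cons (s : String) (l : List String) :
    sumLen (s :: l) = PySem.Str.len s + sumLen l := by
  simp [sumLen]

theorem strLen_nonneg (s : String) : 0 ≤ PySem.Str.len s := by
  simp [PySem.Str.len]

theorem sumLen_nonneg (l : List String) : 0 ≤ sumLen l := by
  induction l with
  | nil => simp [sumLen_nil]
  | cons s rest ih =>
    rw [sumLen_cons]
    have := strLen_nonneg s
    omega

theorem innerA_spec (ci si i : Int) :
    ∀ (row : List String) (j res : Int),
      getStartNucInnerA ci si i row j res =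
        if i = ci ∧ j ≤ si ∧ si < j + (row.length : Int) then
          .inl (res + sumLen (row.take (si - j).toNat) - 1)
        else .inr (res + sumLen row) := by
  intro row
  induction row with
  | nil =>
    intro j res
    rw [if_neg (by push Not; intro _ h; simpa using h)]
    simp [getStartNucInnerA, sumLen_nil]
  | cons s rest ih =>
    intro j res
    rw [getStartNucInnerA]
    by_cases h : i = ci ∧ j = si
    · rw [if_pos h, if_pos ⟨h.1, by omega, by simp; omega⟩]
      have : (si - j).toNat = 0 := by omega
      simp [this, sumLen_nil]
    · rw [if_neg h, ih]
      by_cases hc : i = ci ∧ j ≤ si ∧ si < j + ((s :: rest).length : Int)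
      · have hj : j + 1 ≤ si := by
          rcases hc with ⟨hi, hle, _⟩
          rcases lt_or_eq_of_le hle with h' | h'
          · omega
          · exact absurd ⟨hi, h'⟩ h
        rw [if_pos ⟨hc.1, hj, by have := hc.2.2; simp at this ⊢; omega⟩, if_pos hc]
        have ht : (si - j).toNat = (si - (j + 1)).toNat + 1 := by omega
        rw [ht, List.take_succ_cons, sumLen_cons]
        congr 1
        ring
      · rw [if_neg (by
          intro ⟨hi, hle, hlt⟩
          exact hc ⟨hi, by omega, by simp at hlt ⊢; omega⟩), if_neg hc]
        rw [sumLen_cons]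
        congr 1
        ring

theorem outerA_spec (ci si : Int) :
    ∀ (chains : List (List String)) (i res : Int),
      getStartNucOuterA ci si chains i res =
        if i ≤ ci ∧ ci < i + (chains.length : Int) ∧ 0 ≤ si ∧
            si < ((chains.getD (ci - i).toNat []).length : Int) then
          res + sumLen ((chains.take (ci - i).toNat).flatMap id)
            + sumLen ((chains.getD (ci - i).toNat []).take si.toNat) - 1
        else -1 := by
  intro chains
  induction chains with
  | nil =>
    intro i res
    rw [if_neg (by intro ⟨h1, h2, _⟩; simp at h2; omega)]
    rfl
  | cons row rest ih =>
    intro i res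
    rw [getStartNucOuterA, innerA_spec]
    by_cases h : i = ci ∧ 0 ≤ si ∧ si < (0 : Int) + (row.length : Int)
    · rw [if_pos h, Sum.elim_inl]
      have h0 : (ci - i).toNat = 0 := by omega
      rw [if_pos ⟨by omega, by simp; omega, h.2.1, by
        rw [h0]; simpa using h.2.2⟩]
      simp [h0, sumLen_nil]
    · rw [if_neg h, Sum.elim_inr, ih]
      by_cases hi : i = ci
      · rw [if_neg (by intro ⟨h1, _⟩; omega),
            if_neg (by
              intro ⟨_, _, h3, h4⟩
              have h0 : (ci - i).toNat = 0 := by omega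
              rw [h0] at h4
              exact h ⟨hi, h3, by simpa using h4⟩)]
      · by_cases hlt : i + 1 ≤ ci
        · have h1 : (ci - i).toNat = (ci - (i + 1)).toNat + 1 := by omega
          by_cases hc : i + 1 ≤ ci ∧ ci < i + 1 + (rest.length : Int) ∧ 0 ≤ si ∧
              si < ((rest.getD (ci - (i + 1)).toNat []).length : Int)
          · rw [if_pos hc, if_pos ⟨by omega, by simp; omega, hc.2.2.1, by
              rw [h1, List.getD_cons_succ]; exact hc.2.2.2⟩]
            rw [h1, List.take_succ_cons, List.flatMap_cons, List.getD_cons_succ]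
            have : sumLen (id row ++ (rest.take (ci - (i + 1)).toNat).flatMap id)
                = sumLen row + sumLen ((rest.take (ci - (i + 1)).toNat).flatMap id) := by
              simp [sumLen]
            rw [this]
            ring
          · rw [if_neg hc, if_neg (by
              intro ⟨h2, h3, h4, h5⟩
              rw [h1, List.getD_cons_succ] at h5
              exact hc ⟨hlt, by simp at h3; omega, h4, h5⟩)]
        · rw [if_neg (by intro ⟨_, _⟩; omega), if_neg (by intro ⟨h1, _⟩; omega)]

theorem subOffset_spec :
    ∀ (row : List String) (si : Int),
      subOffset row si =
        if 0 ≤ si ∧ si < (row.length : Int) then sumLen (row.take si.toNat) else -1 := by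
  intro row
  induction row with
  | nil =>
    intro si
    rw [if_neg (by intro ⟨h1, h2⟩; simp at h2; omega)]
    rfl
  | cons s rest ih =>
    intro si
    rw [subOffset]
    by_cases hneg : si < 0
    · rw [if_pos hneg, if_neg (by intro ⟨h1, _⟩; omega)]
    · rw [if_neg hneg]
      by_cases h0 : si = 0
      · rw [if_pos h0, if_pos ⟨by omega, by simp; omega⟩]
        simp [h0, sumLen_nil]
      · rw [if_neg h0, ih]
        by_cases hc : 0 ≤ si - 1 ∧ si - 1 < (rest.length : Int)
        · rw [if_pos hc]
          have hne : ¬ (sumLen (rest.take (si - 1).toNat) = -1) := by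
            have := sumLen_nonneg (rest.take (si - 1).toNat)
            omega
          rw [if_neg hne, if_pos ⟨by omega, by simp; omega⟩]
          have ht : si.toNat = (si - 1).toNat + 1 := by omega
          rw [ht, List.take_succ_cons, sumLen_cons]
          ring
        · rw [if_neg hc, if_pos rfl,
            if_neg (by intro ⟨h1, h2⟩; simp at h2; exact hc ⟨by omega, by omega⟩)]

theorem altB_spec :
    ∀ (chains : List (List String)) (ci si : Int),
      getStartNuc_alt chains ci si =
        if 0 ≤ ci ∧ ci < (chains.length : Int) ∧ 0 ≤ si ∧
            si < ((chains.getD ci.toNat []).length : Int) then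
          sumLen ((chains.take ci.toNat).flatMap id)
            + sumLen ((chains.getD ci.toNat []).take si.toNat)
        else -1 := by
  intro chains
  induction chains with
  | nil =>
    intro ci si
    rw [if_neg (by intro ⟨h1, h2, _⟩; simp at h2; omega)]
    rfl
  | cons row rest ih =>
    intro ci si
    rw [getStartNuc_alt]
    by_cases hneg : ci < 0 ∨ si < 0
    · rw [if_pos hneg, if_neg (by intro ⟨h1, _, h3, _⟩; omega)]
    · rw [if_neg hneg]
      push Not at hneg
      by_cases h0 : ci = 0
      · rw [if_pos h0, subOffset_spec]
        have ht : ci.toNat = 0 := by omega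
        by_cases hr : 0 ≤ si ∧ si < (row.length : Int)
        · rw [if_pos hr, if_pos ⟨by omega, by simp; omega, hr.1, by rw [ht]; simpa using hr.2⟩]
          simp [ht, sumLen_nil]
        · rw [if_neg hr, if_neg (by
            intro ⟨_, _, h3, h4⟩
            rw [ht] at h4
            exact hr ⟨h3, by simpa using h4⟩)]
      · rw [if_neg h0, ih]
        have ht : ci.toNat = (ci - 1).toNat + 1 := by omega
        by_cases hc : 0 ≤ ci - 1 ∧ ci - 1 < (rest.length : Int) ∧ 0 ≤ si ∧
            si < ((rest.getD (ci - 1).toNat []).length : Int)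
        · rw [if_pos hc]
          have hne : ¬ (sumLen ((rest.take (ci - 1).toNat).flatMap id)
              + sumLen ((rest.getD (ci - 1).toNat []).take si.toNat) = -1) := by
            have := sumLen_nonneg ((rest.take (ci - 1).toNat).flatMap id)
            have := sumLen_nonneg ((rest.getD (ci - 1).toNat []).take si.toNat)
            omega
          rw [if_neg hne, if_pos ⟨by omega, by simp; omega, hc.2.2.1, by
            rw [ht, List.getD_cons_succ]; exact hc.2.2.2⟩]
          rw [ht, List.take_succ_cons, List.flatMap_cons, List.getD_cons_succ]
          have : sumLen (id row ++ (rest.take (ci - 1).toNat).flatMap id)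
              = sumLen row + sumLen ((rest.take (ci - 1).toNat).flatMap id) := by
            simp [sumLen]
          rw [this]
          ring
        · rw [if_neg hc, if_pos rfl, if_neg (by
            intro ⟨_, h2, h3, h4⟩
            rw [ht, List.getD_cons_succ] at h4
            exact hc ⟨by omega, by simp at h2; omega, h3, h4⟩)]

-- ===== VERDICT (by name: the statement is the Claim_ definition above) =====
theorem getStartNuc_spec : Claim_equal_getStartNuc := by
  intro chains ci si _
  unfold Spec_getStartNuc getStartNuc
  rw [outerA_spec, altB_spec]
  have h0 : ci - 0 = ci := by omega
  rw [h0]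
  by_cases h : 0 ≤ ci ∧ ci < (chains.length : Int) ∧ 0 ≤ si ∧
      si < ((chains.getD ci.toNat []).length : Int)
  · rw [if_pos ⟨h.1, by omega, h.2.2⟩, if_pos h]
    ring
  · rw [if_neg (by intro ⟨h1, h2, h3⟩; exact h ⟨h1, by omega, h3⟩), if_neg h]
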